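-- pv_equiv track=rewrite | github.com/airbus/discrete-optimization | discrete_optimization/coloring/solvers/toulbar.py | default_costs_matrix
-- ===== SOURCE A (Python) =====
-- def default_costs_matrix(nb_colors_all: int, nb_colors_on_subset: int):
--     costs = [
--         10000 if val1 == val2 else 0
--         for val1 in range(nb_colors_all)
--         for val2 in range(nb_colors_all)
--     ]
--     costs_dict = {}
--     if True:
--         costs_dict = {
--             "out-out": costs,
--             "in-out": [
--                 10000 if val1 == val2 else 0
--                 for val1 in range(nb_colors_on_subset)
--                 for val2 in range(nb_colors_all)
--             ],
--             "out-in": [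
--                 10000 if val1 == val2 else 0
--                 for val1 in range(nb_colors_all)
--                 for val2 in range(nb_colors_on_subset)
--             ],
--             "in-in": [
--                 10000 if val1 == val2 else 0
--                 for val1 in range(nb_colors_on_subset)
--                 for val2 in range(nb_colors_on_subset)
--             ],
--         }
--
--     return costs_dict
-- ===== SOURCE B (Python) =====
-- def default_costs_matrix(nb_colors_all: int, nb_colors_on_subset: int):
--     def build(rows, cols):
--         if rows <= 0 or cols <= 0:
--             return []
--         costs = [0] * (rows * cols)
--         for k in range(min(rows, cols)):
--             costs[k * (cols + 1)] = 10000
--         return costs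
--
--     return {
--         "out-out": build(nb_colors_all, nb_colors_all),
--         "in-out": build(nb_colors_on_subset, nb_colors_all),
--         "out-in": build(nb_colors_all, nb_colors_on_subset),
--         "in-in": build(nb_colors_on_subset, nb_colors_on_subset),
--     }
-- ===== Notes on version B (the rewrite author's own statement) =====
-- stated objective: faster
-- what changed: Replaces the four n*m nested equality-comparison comprehensions by one helper that pre-allocates a zero buffer and writes 10000 at the min(rows,cols) diagonal positions with stride cols+1.
import Mathlib
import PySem

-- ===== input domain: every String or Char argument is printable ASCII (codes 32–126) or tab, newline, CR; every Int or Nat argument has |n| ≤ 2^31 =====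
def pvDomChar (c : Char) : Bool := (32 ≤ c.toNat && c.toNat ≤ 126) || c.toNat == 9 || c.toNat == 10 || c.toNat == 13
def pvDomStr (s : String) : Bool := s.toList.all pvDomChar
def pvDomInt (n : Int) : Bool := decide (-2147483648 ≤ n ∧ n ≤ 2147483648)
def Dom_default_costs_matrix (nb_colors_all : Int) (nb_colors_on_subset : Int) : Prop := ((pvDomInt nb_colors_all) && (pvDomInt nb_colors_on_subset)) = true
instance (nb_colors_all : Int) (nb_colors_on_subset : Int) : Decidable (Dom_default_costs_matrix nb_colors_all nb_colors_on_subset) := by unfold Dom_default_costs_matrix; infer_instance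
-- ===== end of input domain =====

-- B builds each flattened cost block by writing 10000 at the diagonal positions (stride cols+1)
-- of a pre-zeroed buffer, instead of A's nested val1==val2 comparison comprehensions.


-- ===== PORT A =====
-- the nested comprehension  [10000 if v1 == v2 else 0 for v1 in range(r) for v2 in range(c)]
def pvCostsA (r c : Int) : List Int :=
  (PySem.List.pyRange 0 r 1).flatMap (fun v1 =>
    (PySem.List.pyRange 0 c 1).map (fun v2 => if v1 == v2 then (10000 : Int) else 0))

def default_costs_matrix (nb_colors_all : Int) (nb_colors_on_subset : Int) : List (String × List Int) :=
  let costs := pvCostsA nb_colors_all nb_colors_all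
  [("out-out", costs),
   ("in-out", pvCostsA nb_colors_on_subset nb_colors_all),
   ("out-in", pvCostsA nb_colors_all nb_colors_on_subset),
   ("in-in", pvCostsA nb_colors_on_subset nb_colors_on_subset)]

-- ===== PORT B =====
-- build(rows, cols): zero buffer of rows*cols, then set index k*(cols+1) := 10000 for k < min(rows, cols)
def pvBuild (rows cols : Int) : List Int :=
  if rows ≤ 0 ∨ cols ≤ 0 then []
  else
    (PySem.List.pyRange 0 (min rows cols) 1).foldl
      (fun costs k => PySem.List.pySetD costs (k * (cols + 1)) 10000)
      (List.replicate (rows * cols).toNat 0)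

def default_costs_matrix_alt (nb_colors_all : Int) (nb_colors_on_subset : Int) : List (String × List Int) :=
  [("out-out", pvBuild nb_colors_all nb_colors_all),
   ("in-out", pvBuild nb_colors_on_subset nb_colors_all),
   ("out-in", pvBuild nb_colors_all nb_colors_on_subset),
   ("in-in", pvBuild nb_colors_on_subset nb_colors_on_subset)]

-- ===== PRECONDITION & SPEC =====
def Spec_default_costs_matrix (nb_colors_all : Int) (nb_colors_on_subset : Int) (out : List (String × List Int)) : Prop := out = default_costs_matrix_alt nb_colors_all nb_colors_on_subset
instance (nb_colors_all : Int) (nb_colors_on_subset : Int) (out : List (String × List Int)) : Decidable (Spec_default_costs_matrix nb_colors_all nb_colors_on_subset out) := by unfold Spec_default_costs_matrix; infer_instance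

-- ===== CLAIM (what is proved, stated in full; the proofs are below) =====
def Claim_equal_default_costs_matrix : Prop := ∀ (nb_colors_all : Int) (nb_colors_on_subset : Int), Dom_default_costs_matrix nb_colors_all nb_colors_on_subset → Spec_default_costs_matrix nb_colors_all nb_colors_on_subset (default_costs_matrix nb_colors_all nb_colors_on_subset)

-- ===== LEMMAS AND PROOFS =====

-- the row [10000 if i == j else 0 for j in range(m)] is a zero row with (at most) one write
lemma pv_row_eq (m i : Nat) :
    (List.range m).map (fun j => if i = j then (10000 : Int) else 0)
      = (List.replicate m (0 : Int)).set i 10000 := by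
  apply List.ext_getElem
  · simp
  · intro j h1 h2
    simp [List.getElem_set]

lemma pv_length_foldl_set (ks : List Nat) (f : Nat → Nat) (v : Int) (xs : List Int) :
    (ks.foldl (fun acc k => acc.set (f k) v) xs).length = xs.length := by
  induction ks generalizing xs with
  | nil => rfl
  | cons k ks ih => simp [List.foldl_cons, ih]

lemma pv_foldl_set_append (ks : List Nat) (f : Nat → Nat) (v : Int) (xs ys : List Int)
    (h : ∀ k ∈ ks, f k < xs.length) :
    ks.foldl (fun acc k => acc.set (f k) v) (xs ++ ys)
      = ks.foldl (fun acc k => acc.set (f k) v) xs ++ ys := by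
  induction ks generalizing xs with
  | nil => rfl
  | cons k ks ih =>
    have hk : f k < xs.length := h k (by simp)
    rw [List.foldl_cons, List.foldl_cons, List.set_append_left _ _ hk, ih]
    intro k' hk'
    simpa using h k' (by simp [hk'])

-- core: diagonal writes into a zero buffer = the nested comparison comprehension (Nat form)
lemma pv_diag (n m : Nat) :
    (List.range n).flatMap (fun i =>
        (List.range m).map (fun j => if i = j then (10000 : Int) else 0))
      = (List.range (min n m)).foldl (fun acc k => acc.set (k * (m + 1)) 10000)
          (List.replicate (n * m) (0 : Int)) := by
  induction n with
  | zero => simp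
  | succ n ih =>
    have hrepl : List.replicate ((n + 1) * m) (0 : Int)
        = List.replicate (n * m) 0 ++ List.replicate m 0 := by
      rw [← List.replicate_add]; ring_nf
    have hbound : ∀ k, k < n → k < m → k * (m + 1) < n * m := by
      intro k h1 h2
      calc k * (m + 1) + 1 = k * m + (k + 1) := by ring
        _ ≤ k * m + m := by omega
        _ = (k + 1) * m := by ring
        _ ≤ n * m := Nat.mul_le_mul_right m (by omega)
    rw [List.range_succ, List.flatMap_append, ih, List.flatMap_singleton, pv_row_eq, hrepl]
    by_cases hm : m ≤ n
    · have hmin : min (n + 1) m = min n m := by omega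
      have hset : (List.replicate m (0 : Int)).set n 10000 = List.replicate m 0 := by
        apply List.set_eq_of_length_le; simpa using hm
      rw [hmin, hset, pv_foldl_set_append]
      intro k hk
      have hk' : k < min n m := List.mem_range.mp hk
      simpa using hbound k (by omega) (by omega)
    · have hn : n < m := by omega
      have hmin1 : min (n + 1) m = n + 1 := by omega
      have hmin2 : min n m = n := by omega
      rw [hmin1, List.range_succ, List.foldl_append, List.foldl_cons, List.foldl_nil,
        pv_foldl_set_append, hmin2]
      · have hlen : ((List.range n).foldl (fun acc k => acc.set (k * (m + 1)) 10000)
            (List.replicate (n * m) (0 : Int))).length = n * m := by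
          rw [pv_length_foldl_set]; simp
        rw [List.set_append_right _ _ (by rw [hlen]; nlinarith), hlen]
        have hidx : n * (m + 1) - n * m = n := by
          have : n * (m + 1) = n * m + n := by ring
          omega
        rw [hidx]
      · intro k hk
        have hk' : k < n := List.mem_range.mp hk
        simpa using hbound k hk' (by omega)

-- the two block builders agree on every pair of Int sizes
lemma pv_block_eq (r c : Int) : pvCostsA r c = pvBuild r c := by
  unfold pvCostsA pvBuild
  by_cases h : r ≤ 0 ∨ c ≤ 0
  · rw [if_pos h]
    rcases h with h | h
    · rw [PySem.List.pyRange_one_eq_nil (a := 0) (b := r) (by omega)]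
      simp
    · rw [PySem.List.pyRange_one_eq_nil (a := 0) (b := c) (by omega)]
      simp
  · rw [if_neg h]
    push Not at h
    obtain ⟨hr, hc⟩ := h
    have hL : (PySem.List.pyRange 0 r 1).flatMap (fun v1 =>
          (PySem.List.pyRange 0 c 1).map (fun v2 => if v1 == v2 then (10000 : Int) else 0))
        = (List.range r.toNat).flatMap (fun i =>
            (List.range c.toNat).map (fun j => if i = j then (10000 : Int) else 0)) := by
      rw [PySem.List.pyRange_one, PySem.List.pyRange_one, List.flatMap_map]
      simp only [sub_zero]
      congr 1
      funext i
      rw [List.map_map]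
      congr 1
      funext j
      simp
    have hR : (PySem.List.pyRange 0 (min r c) 1).foldl
          (fun costs k => PySem.List.pySetD costs (k * (c + 1)) 10000)
          (List.replicate (r * c).toNat (0 : Int))
        = (List.range (min r c).toNat).foldl
            (fun acc k => acc.set (k * (c.toNat + 1)) 10000)
            (List.replicate (r * c).toNat (0 : Int)) := by
      rw [PySem.List.pyRange_one, List.foldl_map]
      simp only [sub_zero]
      congr 1
      funext acc k
      have hcast : (0 + (k : Int)) * (c + 1) = ((k * (c.toNat + 1) : Nat) : Int) := by
        push_cast
        rw [Int.toNat_of_nonneg hc.le]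
        ring
      rw [hcast, PySem.List.pySetD_natCast]
    rw [hL, hR]
    have hmin : (min r c).toNat = min r.toNat c.toNat := by omega
    have hmul : (r * c).toNat = r.toNat * c.toNat := by
      have h1 : ((r.toNat * c.toNat : Nat) : Int) = r * c := by
        push_cast
        rw [Int.toNat_of_nonneg hr.le, Int.toNat_of_nonneg hc.le]
      rw [← h1, Int.toNat_natCast]
    rw [hmin, hmul]
    exact pv_diag r.toNat c.toNat

-- ===== VERDICT (by name: the statement is the Claim_ definition above) =====
theorem default_costs_matrix_spec : Claim_equal_default_costs_matrix := by
  intro a s _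
  show _ = _
  unfold default_costs_matrix default_costs_matrix_alt
  simp only [pv_block_eq]
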